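-- pv_equiv track=rewrite | github.com/Madaspe/problems | ege_problem_24/24_1/5.py | count
-- ===== SOURCE A (Python) =====
-- def count(string):
--     cnt = 0
--     for index in range(0, len(string)):
--         slice = string[index: index+5:]
--
--         if len(slice) != 5:
--             continue
--
--         check = True
--         for slice_index in range(1, len(slice) - 1):
--             if slice[slice_index - 1] == slice[slice_index] or slice[slice_index] == slice[slice_index + 1]:
--                 check = False
--
--         if check:
--             cnt += 1
--     return cnt
-- ===== SOURCE B (Python) =====
-- def count(string):
--     n = len(string)
--     eq = [string[i] == string[i + 1] for i in range(n - 1)]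
--     pref = [0]
--     for e in eq:
--         pref.append(pref[-1] + e)
--     return sum(1 for s in range(n - 4) if pref[s + 4] - pref[s] == 0)
-- ===== Notes on version B (the rewrite author's own statement) =====
-- stated objective: faster
-- what changed: Replaces A's per-window slicing and rescan of the 4 adjacent pairs (via an inner loop over each length-5 slice) with one global adjacency pass plus prefix sums, answering each window start by a constant-time range query.
import Mathlib
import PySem

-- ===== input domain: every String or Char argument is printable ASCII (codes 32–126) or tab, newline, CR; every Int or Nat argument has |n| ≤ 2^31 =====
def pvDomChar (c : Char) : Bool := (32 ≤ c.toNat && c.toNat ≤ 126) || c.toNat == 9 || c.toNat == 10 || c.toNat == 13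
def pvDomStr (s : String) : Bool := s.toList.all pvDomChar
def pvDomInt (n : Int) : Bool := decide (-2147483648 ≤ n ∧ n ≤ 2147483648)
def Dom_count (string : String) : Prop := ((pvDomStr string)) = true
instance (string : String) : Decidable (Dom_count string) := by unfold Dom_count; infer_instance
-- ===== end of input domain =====

-- B replaces A's per-window rescans of the 4 adjacent pairs by one global adjacency pass
-- plus prefix sums queried per window start (simpler/idiomatic; same exact count).

-- ===== PORT A =====
def pvCntA (cs : List Char) : Int :=
  (PySem.List.pyRange 0 (PySem.List.len cs) 1).foldl (fun cnt index =>
    let slc := PySem.List.slice cs (some index) (some (index + 5))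
    if PySem.List.len slc ≠ 5 then cnt
    else
      if (PySem.List.pyRange 1 (PySem.List.len slc - 1) 1).foldl
          (fun check si =>
            if PySem.List.pyGetD slc (si - 1) ' ' == PySem.List.pyGetD slc si ' '
               || PySem.List.pyGetD slc si ' ' == PySem.List.pyGetD slc (si + 1) ' '
            then false else check) true
      then cnt + 1 else cnt) 0

def count (string : String) : Int := pvCntA string.toList

-- ===== PORT B =====
def pvCntB (cs : List Char) : Int :=
  let n : Int := PySem.List.len cs
  let eq := (PySem.List.pyRange 0 (n - 1) 1).map
      (fun i => PySem.List.pyGetD cs i ' ' == PySem.List.pyGetD cs (i + 1) ' ')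
  let pref := eq.foldl
      (fun p e => p ++ [PySem.List.pyGetD p (-1) 0 + (if e then (1 : Int) else 0)]) [(0 : Int)]
  ((PySem.List.pyRange 0 (n - 4) 1).map
      (fun s => if PySem.List.pyGetD pref (s + 4) 0 - PySem.List.pyGetD pref s 0 = 0
                then (1 : Int) else 0)).sum

def count_alt (string : String) : Int := pvCntB string.toList

-- ===== PRECONDITION & SPEC =====
def Spec_count (string : String) (out : Int) : Prop := out = count_alt string
instance (string : String) (out : Int) : Decidable (Spec_count string out) := by unfold Spec_count; infer_instance

-- ===== CLAIM (what is proved, stated in full; the proofs are below) =====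
def Claim_equal_count : Prop := ∀ (string : String), Dom_count string → Spec_count string (count string)

-- ===== LEMMAS AND PROOFS =====

def pvPE (cs : List Char) (i : Int) : Bool :=
  PySem.List.pyGetD cs i ' ' == PySem.List.pyGetD cs (i + 1) ' '

def pvGood (cs : List Char) (s : Int) : Bool :=
  !(pvPE cs s || pvPE cs (s + 1) || pvPE cs (s + 2) || pvPE cs (s + 3))

def pvSpec (cs : List Char) : Int :=
  ((PySem.List.pyRange 0 (PySem.List.len cs - 4) 1).countP (pvGood cs) : Int)

theorem pref_struct (bs : List Bool) :
    bs.foldl (fun p e => p ++ [PySem.List.pyGetD p (-1) 0 + (if e then (1:Int) else 0)]) [(0:Int)]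
    = (PySem.List.pyRange 0 ((bs.length : Int) + 1)).map
        (fun k => ((bs.take k.toNat).countP id : Int)) := by
  induction bs using List.reverseRecOn with
  | nil =>
      have h := PySem.List.pyRange_one_singleton (0 : Int)
      norm_num at h
      simp [h]
  | append_singleton ys e ih =>
      rw [List.foldl_append, ih, List.foldl_cons, List.foldl_nil]
      have hsplit : PySem.List.pyRange 0 ((ys.length : Int) + 1)
          = PySem.List.pyRange 0 (ys.length : Int) ++ [(ys.length : Int)] :=
        PySem.List.pyRange_one_succ_right (by positivity)
      have hlen2 : (((ys ++ [e]).length : Int) + 1) = ((ys.length : Int) + 1) + 1 := by simp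
      rw [hlen2, hsplit, PySem.List.pyRange_one_succ_right (a := 0) (b := (ys.length : Int) + 1) (by positivity), hsplit]
      simp only [List.map_append, List.map_cons, List.map_nil, List.append_assoc,
        List.singleton_append]
      rw [PySem.List.pyGetD_neg_one_append_singleton]
      have htoNat : ((ys.length : Int)).toNat = ys.length := by omega
      have htoNat1 : ((ys.length : Int) + 1).toNat = ys.length + 1 := by omega
      congr 1
      · apply List.map_congr_left
        intro k hk
        rw [PySem.List.mem_pyRange_one] at hk
        congr 2
        rw [List.take_append_of_le_length (by omega)]
      · congr 2
        · rw [htoNat, List.take_append_of_le_length (by omega), List.take_length]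
        · rw [htoNat1]
          have ht : List.take (ys.length + 1) (ys ++ [e]) = ys ++ [e] :=
            List.take_of_length_le (by simp)
          rw [ht]
          cases e <;> simp [List.countP_append]

theorem countP_take_step (bs : List Bool) (j : Nat) (h : j < bs.length) :
    (bs.take (j + 1)).countP id
      = (bs.take j).countP id + (if bs.getD j false then 1 else 0) := by
  rw [List.take_add_one, List.getElem?_eq_getElem h, List.countP_append, List.getD_eq_getElem _ _ h]
  cases hb : bs[j] <;> simp

theorem pvCntB_eq_spec (cs : List Char) : pvCntB cs = pvSpec cs := by
  unfold pvCntB pvSpec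
  simp only [PySem.List.len_eq]
  set g : Int → Bool := fun i => PySem.List.pyGetD cs i ' ' == PySem.List.pyGetD cs (i + 1) ' ' with hg
  set eqL : List Bool := (PySem.List.pyRange 0 ((cs.length : Int) - 1) 1).map g with heq
  simp only [pref_struct]
  set f : Int → Int := fun k => ((eqL.take k.toNat).countP id : Int) with hf
  have heqlen : eqL.length = cs.length - 1 := by
    rw [heq, List.length_map, PySem.List.length_pyRange_one]; omega
  have hpt : ∀ s ∈ PySem.List.pyRange 0 ((cs.length : Int) - 4) 1,
      (if PySem.List.pyGetD ((PySem.List.pyRange 0 ((eqL.length : Int) + 1) 1).map f) (s + 4) 0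
          - PySem.List.pyGetD ((PySem.List.pyRange 0 ((eqL.length : Int) + 1) 1).map f) s 0 = 0
       then (1 : Int) else 0)
      = (if pvGood cs s then (1 : Int) else 0) := by
    intro s hs
    rw [PySem.List.mem_pyRange_one] at hs
    have hn5 : 5 ≤ cs.length := by omega
    refine if_congr ?_ rfl rfl
    have h1 : PySem.List.pyGetD ((PySem.List.pyRange 0 ((eqL.length : Int) + 1) 1).map f) (s + 4) 0
        = f (s + 4) :=
      PySem.List.pyGetD_map_pyRange_of_nonneg f _ _ _ (by omega) (by omega)
    have h2 : PySem.List.pyGetD ((PySem.List.pyRange 0 ((eqL.length : Int) + 1) 1).map f) s 0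
        = f s :=
      PySem.List.pyGetD_map_pyRange_of_nonneg f _ _ _ (by omega) (by omega)
    rw [h1, h2, hf]
    simp only
    set a : Nat := s.toNat with ha
    have hsa : s = (a : Int) := by omega
    have e4 : (s + 4).toNat = a + 4 := by omega
    have hexp : (eqL.take (a + 4)).countP id
        = (eqL.take a).countP id
          + ((if eqL.getD a false then 1 else 0)
          + ((if eqL.getD (a+1) false then 1 else 0)
          + ((if eqL.getD (a+2) false then 1 else 0)
          + (if eqL.getD (a+3) false then 1 else 0)))) := by
      rw [show a + 4 = (a+3) + 1 by ring, countP_take_step _ _ (by omega),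
          show a + 3 = (a+2) + 1 by ring, countP_take_step _ _ (by omega),
          show a + 2 = (a+1) + 1 by ring, countP_take_step _ _ (by omega),
          countP_take_step _ _ (by omega)]
      ring
    have hgetd : ∀ j : Nat, j < eqL.length → eqL.getD j false = pvPE cs (j : Int) := by
      intro j hj
      rw [← PySem.List.pyGetD_natCast]
      conv_lhs => rw [heq]
      exact PySem.List.pyGetD_map_pyRange_of_nonneg g ((cs.length : Int) - 1) (j : Int) false
        (by omega) (by omega)
    rw [e4, hexp]
    rw [hgetd a (by omega), hgetd (a+1) (by omega), hgetd (a+2) (by omega), hgetd (a+3) (by omega)]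
    have c1 : ((a+1 : Nat) : Int) = s + 1 := by omega
    have c2 : ((a+2 : Nat) : Int) = s + 2 := by omega
    have c3 : ((a+3 : Nat) : Int) = s + 3 := by omega
    rw [c1, c2, c3, ← hsa, pvGood]
    cases hb0 : pvPE cs s <;> cases hb1 : pvPE cs (s+1) <;> cases hb2 : pvPE cs (s+2) <;>
      cases hb3 : pvPE cs (s+3) <;> simp
  rw [List.map_congr_left hpt, PySem.List.sum_map_ite_one_zero (pvGood cs)]

theorem pvPgood (cs : List Char) (index : Int) (h0 : 0 ≤ index)
    (h5 : index + 5 ≤ (cs.length : Int)) :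
    ((PySem.List.pyRange 1 (((PySem.List.slice cs (some index) (some (index + 5))).length : Int) - 1) 1).foldl
      (fun check si =>
        if PySem.List.pyGetD (PySem.List.slice cs (some index) (some (index + 5))) (si - 1) ' '
            == PySem.List.pyGetD (PySem.List.slice cs (some index) (some (index + 5))) si ' '
           || PySem.List.pyGetD (PySem.List.slice cs (some index) (some (index + 5))) si ' '
            == PySem.List.pyGetD (PySem.List.slice cs (some index) (some (index + 5))) (si + 1) ' '
        then false else check) true) = pvGood cs index := by
  set a : Nat := index.toNat with ha
  have ha5 : a + 5 ≤ cs.length := by omega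
  -- five explicit window characters
  have hdlen : 5 ≤ (cs.drop a).length := by simp [List.length_drop]; omega
  obtain ⟨c0, t0, e0⟩ := List.exists_cons_of_ne_nil (l := cs.drop a) (by intro h; rw [h] at hdlen; simp at hdlen)
  obtain ⟨c1, t1, e1⟩ := List.exists_cons_of_ne_nil (l := t0) (by intro h; rw [e0, h] at hdlen; simp at hdlen)
  obtain ⟨c2, t2, e2⟩ := List.exists_cons_of_ne_nil (l := t1) (by intro h; rw [e0, e1, h] at hdlen; simp at hdlen)
  obtain ⟨c3, t3, e3⟩ := List.exists_cons_of_ne_nil (l := t2) (by intro h; rw [e0, e1, e2, h] at hdlen; simp at hdlen)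
  obtain ⟨c4, t4, e4⟩ := List.exists_cons_of_ne_nil (l := t3) (by intro h; rw [e0, e1, e2, e3, h] at hdlen; simp at hdlen)
  have hdrop : cs.drop a = c0 :: c1 :: c2 :: c3 :: c4 :: t4 := by
    rw [e0, e1, e2, e3, e4]
  have hsl : PySem.List.slice cs (some index) (some (index + 5))
      = [c0, c1, c2, c3, c4] := by
    rw [PySem.List.slice_toNat cs h0 (by omega),
      show (index + 5).toNat - index.toNat = 5 by omega, ← ha, hdrop]
    rfl
  have hl5 : (PySem.List.slice cs (some index) (some (index + 5))).length = 5 := by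
    rw [hsl]; rfl
  rw [hl5, show ((5:Nat):Int) - 1 = 4 by norm_num,
    show PySem.List.pyRange 1 4 1 = [1, 2, 3] from by decide]
  simp only [List.foldl_cons, List.foldl_nil, hsl]
  simp only [show (1:Int) - 1 = 0 from by norm_num, show (1:Int) + 1 = 2 from by norm_num,
    show (2:Int) - 1 = 1 from by norm_num, show (2:Int) + 1 = 3 from by norm_num,
    show (3:Int) - 1 = 2 from by norm_num, show (3:Int) + 1 = 4 from by norm_num]
  have g0 : PySem.List.pyGetD [c0, c1, c2, c3, c4] (0:Int) ' ' = c0 := rfl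
  have g1 : PySem.List.pyGetD [c0, c1, c2, c3, c4] (1:Int) ' ' = c1 := rfl
  have g2 : PySem.List.pyGetD [c0, c1, c2, c3, c4] (2:Int) ' ' = c2 := rfl
  have g3 : PySem.List.pyGetD [c0, c1, c2, c3, c4] (3:Int) ' ' = c3 := rfl
  have g4 : PySem.List.pyGetD [c0, c1, c2, c3, c4] (4:Int) ' ' = c4 := rfl
  simp only [g0, g1, g2, g3, g4]
  -- window chars from cs
  have hc : ∀ j : Nat, j < 5 → PySem.List.pyGetD cs (index + (j : Int)) ' '
      = [c0, c1, c2, c3, c4].getD j ' ' := by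
    intro j hj
    rw [show index + (j : Int) = ((a + j : Nat) : Int) by omega, PySem.List.pyGetD_natCast,
      List.getD_eq_getElem _ _ (by omega)]
    have hjd : j < (cs.drop a).length := by rw [hdrop]; simp; omega
    have hge := List.getElem_drop (xs := cs) (i := a) (j := j) (h := hjd)
    rw [← hge]
    simp only [hdrop]
    interval_cases j <;> rfl
  have hc0 := hc 0 (by norm_num); have hc1 := hc 1 (by norm_num)
  have hc2 := hc 2 (by norm_num); have hc3 := hc 3 (by norm_num)
  have hc4 := hc 4 (by norm_num)
  norm_num at hc0 hc1 hc2 hc3 hc4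
  simp only [pvGood, pvPE,
    show index + 1 + 1 = index + 2 from by ring,
    show index + 2 + 1 = index + 3 from by ring,
    show index + 3 + 1 = index + 4 from by ring,
    hc0, hc1, hc2, hc3, hc4]
  by_cases b01 : c0 = c1 <;> by_cases b12 : c1 = c2 <;> by_cases b23 : c2 = c3 <;>
    by_cases b34 : c3 = c4 <;> simp [b01, b12, b23, b34]

theorem pvCntA_eq_spec (cs : List Char) : pvCntA cs = pvSpec cs := by
  unfold pvCntA pvSpec
  simp only [PySem.List.len_eq]
  set P : Int → Bool := fun index =>
    (PySem.List.pyRange 1 ((PySem.List.slice cs (some index) (some (index + 5))).length - 1) 1).foldl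
      (fun check si =>
        if PySem.List.pyGetD (PySem.List.slice cs (some index) (some (index + 5))) (si - 1) ' '
            == PySem.List.pyGetD (PySem.List.slice cs (some index) (some (index + 5))) si ' '
           || PySem.List.pyGetD (PySem.List.slice cs (some index) (some (index + 5))) si ' '
            == PySem.List.pyGetD (PySem.List.slice cs (some index) (some (index + 5))) (si + 1) ' '
        then false else check) true with hP
  have hbody : ∀ (cnt : Int), ∀ index ∈ PySem.List.pyRange 0 (cs.length : Int) 1,
      (fun cnt index =>
        let slc := PySem.List.slice cs (some index) (some (index + 5))
        if ((slc.length : Int) ≠ 5) then cnt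
        else if (PySem.List.pyRange 1 ((slc.length : Int) - 1) 1).foldl
            (fun check si =>
              if PySem.List.pyGetD slc (si - 1) ' ' == PySem.List.pyGetD slc si ' '
                 || PySem.List.pyGetD slc si ' ' == PySem.List.pyGetD slc (si + 1) ' '
              then false else check) true
          then cnt + 1 else cnt) cnt index
      = (if (((PySem.List.slice cs (some index) (some (index + 5))).length : Int) = 5 ∧ P index = true)
         then cnt + 1 else cnt) := by
    intro cnt index _
    simp only [hP]
    by_cases h5 : (((PySem.List.slice cs (some index) (some (index + 5))).length : Int) = 5) <;>
      simp [h5]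
  trans ((PySem.List.pyRange 0 (cs.length : Int) 1).foldl
      (fun cnt index =>
        if (((PySem.List.slice cs (some index) (some (index + 5))).length : Int) = 5 ∧ P index = true)
        then cnt + 1 else cnt) 0)
  · exact PySem.List.foldl_congr_mem _ _ _ _ hbody
  rw [PySem.List.foldl_ite_add_one, zero_add]
  have hlenslc : ∀ index : Int, 0 ≤ index →
      (PySem.List.slice cs (some index) (some (index + 5))).length
        = min 5 (cs.length - index.toNat) := by
    intro index h0
    rw [PySem.List.slice_toNat cs h0 (by omega)]
    rw [show (index + 5).toNat - index.toNat = 5 by omega]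
    simp [List.length_take, List.length_drop]
  have hPgood : ∀ index : Int, 0 ≤ index → index + 5 ≤ (cs.length : Int) →
      P index = pvGood cs index := by
    intro index h0 h5
    rw [hP]
    exact pvPgood cs index h0 h5
  by_cases hsmall : (cs.length : Int) - 4 ≤ 0
  · rw [PySem.List.pyRange_one_eq_nil hsmall]
    simp only [List.countP_nil, Nat.cast_zero]
    rw [List.countP_eq_zero.2]
    · rfl
    · intro index hidx
      rw [PySem.List.mem_pyRange_one] at hidx
      simp only [decide_eq_true_eq, not_and]
      intro hlen5
      exfalso
      rw [hlenslc index hidx.1] at hlen5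
      omega
  · rw [PySem.List.pyRange_one_append 0 ((cs.length : Int) - 4) (cs.length : Int) (by omega) (by omega),
      List.countP_append]
    have hz : List.countP (fun index => decide ((((PySem.List.slice cs (some index) (some (index + 5))).length : Int) = 5 ∧ P index = true))) (PySem.List.pyRange ((cs.length : Int) - 4) (cs.length : Int) 1) = 0 := by
      apply List.countP_eq_zero.2
      intro index hidx
      rw [PySem.List.mem_pyRange_one] at hidx
      simp only [decide_eq_true_eq, not_and]
      intro hlen5
      exfalso
      rw [hlenslc index (by omega)] at hlen5
      omega
    rw [hz, Nat.add_zero]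
    congr 1
    apply List.countP_congr
    intro index hidx
    rw [PySem.List.mem_pyRange_one] at hidx
    have h5 : index + 5 ≤ (cs.length : Int) := by omega
    have hl5 : (PySem.List.slice cs (some index) (some (index + 5))).length = 5 := by
      rw [hlenslc index hidx.1]; omega
    simp [hl5, hPgood index hidx.1 h5]

-- ===== VERDICT (by name: the statement is the Claim_ definition above) =====
theorem count_spec : Claim_equal_count := by
  intro s _
  show count s = count_alt s
  unfold count count_alt
  rw [pvCntA_eq_spec, pvCntB_eq_spec]
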